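-- pv_equiv track=rewrite | github.com/Rit7439/Infosys-Review-sense_extraction-feedback | streamlit login/frontend_app.py | quick_sentiment
-- ===== SOURCE A (Python) =====
-- POSITIVE_WORDS = {"good","great","awesome","excellent","love","like","satisfied","happy","amazing","fantastic","smooth","fast"}
--
-- NEGATIVE_WORDS = {"bad","poor","terrible","hate","dislike","unsatisfied","unhappy","awful","slow","bug","issue","problem"}
--
-- def quick_sentiment(text: str) -> tuple[str, int]:
--     tokens = [t.strip('.,!?;:"\'').lower() for t in text.split()]
--     score = 0
--     for t in tokens:
--         if t in POSITIVE_WORDS: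
--             score += 1
--         if t in NEGATIVE_WORDS:
--             score -= 1
--     label = "Neutral"
--     if score > 0:
--         label = "Positive"
--     elif score < 0:
--         label = "Negative"
--     return label, score
-- ===== SOURCE B (Python) =====
-- import collections
--
-- POSITIVE_WORDS = {"good","great","awesome","excellent","love","like","satisfied","happy","amazing","fantastic","smooth","fast"}
--
-- NEGATIVE_WORDS = {"bad","poor","terrible","hate","dislike","unsatisfied","unhappy","awful","slow","bug","issue","problem"}
--
-- def quick_sentiment(text: str) -> tuple[str, int]:
--     tokens = [t.strip('.,!?;:"\'').lower() for t in text.split()]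
--     counts = collections.Counter(tokens)
--     score = sum(counts[w] for w in POSITIVE_WORDS) - sum(counts[w] for w in NEGATIVE_WORDS)
--     if score > 0:
--         label = "Positive"
--     elif score < 0:
--         label = "Negative"
--     else:
--         label = "Neutral"
--     return label, score
-- ===== Notes on version B (the rewrite author's own statement) =====
-- stated objective: alternative
-- what changed: B builds a Counter of the tokens once and computes the score by summing counts over the fixed positive/negative vocabularies, instead of testing set membership for every token in a loop.
import Mathlib
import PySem

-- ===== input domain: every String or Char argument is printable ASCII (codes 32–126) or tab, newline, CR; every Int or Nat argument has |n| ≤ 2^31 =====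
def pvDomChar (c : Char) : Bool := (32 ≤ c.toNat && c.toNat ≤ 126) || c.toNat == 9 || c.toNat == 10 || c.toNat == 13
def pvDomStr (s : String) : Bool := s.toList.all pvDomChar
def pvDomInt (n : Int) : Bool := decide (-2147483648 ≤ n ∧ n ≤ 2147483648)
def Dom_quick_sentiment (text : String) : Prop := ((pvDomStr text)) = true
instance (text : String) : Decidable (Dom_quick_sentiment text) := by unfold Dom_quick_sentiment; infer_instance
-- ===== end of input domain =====

-- B replaces A's per-token membership loop by one Counter pass plus sums over the fixed vocabularies (alternative decomposition, same cost).

-- ===== PORT A =====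
def POSITIVE_WORDS : List String := ["good","great","awesome","excellent","love","like","satisfied","happy","amazing","fantastic","smooth","fast"]
def NEGATIVE_WORDS : List String := ["bad","poor","terrible","hate","dislike","unsatisfied","unhappy","awful","slow","bug","issue","problem"]

def pvTokens (text : String) : List String :=
  (PySem.Str.split₀ text).map (fun t => PySem.Str.lower (PySem.Str.stripChars t ".,!?;:\"'"))

def quick_sentiment (text : String) : String × Int :=
  let tokens := pvTokens text
  let score : Int := tokens.foldl (fun score t =>
    let score := if POSITIVE_WORDS.contains t then score + 1 else score
    if NEGATIVE_WORDS.contains t then score - 1 else score) 0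
  let label := "Neutral"
  let label := if score > 0 then "Positive" else if score < 0 then "Negative" else label
  (label, score)

-- ===== PORT B =====
def quick_sentiment_alt (text : String) : String × Int :=
  let tokens := pvTokens text
  let counts := PySem.Dict.counter tokens
  let score : Int := POSITIVE_WORDS.foldl (fun s w => s + counts.getD w 0) 0
                   - NEGATIVE_WORDS.foldl (fun s w => s + counts.getD w 0) 0
  let label := if score > 0 then "Positive" else if score < 0 then "Negative" else "Neutral"
  (label, score)

-- ===== PRECONDITION & SPEC =====
def Spec_quick_sentiment (text : String) (out : String × Int) : Prop := out = quick_sentiment_alt text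
instance (text : String) (out : String × Int) : Decidable (Spec_quick_sentiment text out) := by unfold Spec_quick_sentiment; infer_instance

-- ===== CLAIM =====
def Claim_equal_quick_sentiment : Prop := ∀ (text : String), Dom_quick_sentiment text → Spec_quick_sentiment text (quick_sentiment text)

-- ===== LEMMAS AND PROOFS =====
def pvSumCount (ws ts : List String) : Int := (ws.map (fun w => ((ts.count w : Nat) : Int))).sum

theorem pvSumCount_nil (ws : List String) : pvSumCount ws [] = 0 := by
  simp [pvSumCount]

theorem pvSumCount_cons_not_mem (ws : List String) (t : String) (ts : List String)
    (h : t ∉ ws) : pvSumCount ws (t :: ts) = pvSumCount ws ts := by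
  induction ws with
  | nil => simp [pvSumCount]
  | cons w ws ih =>
    simp only [List.mem_cons, not_or] at h
    simp only [pvSumCount, List.map_cons, List.sum_cons] at *
    have hne : (t == w) = false := by
      rw [beq_eq_false_iff_ne]; exact h.1
    rw [ih h.2, List.count_cons, hne]
    simp

theorem pvSumCount_cons (ws : List String) (h : ws.Nodup) (t : String) (ts : List String) :
    pvSumCount ws (t :: ts) = pvSumCount ws ts + (if ws.contains t then 1 else 0) := by
  induction ws with
  | nil => simp [pvSumCount]
  | cons w ws ih =>
    rcases List.nodup_cons.mp h with ⟨hw, hnd⟩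
    by_cases hwt : w = t
    · subst hwt
      simp only [pvSumCount, List.map_cons, List.sum_cons] at *
      rw [List.count_cons]
      have := pvSumCount_cons_not_mem ws w ts hw
      simp only [pvSumCount] at this
      rw [this]
      simp only [List.contains_cons, beq_self_eq_true, Bool.true_or]
      push_cast
      omega
    · simp only [pvSumCount, List.map_cons, List.sum_cons] at *
      have hne : (t == w) = false := by
        rw [beq_eq_false_iff_ne]; exact fun e => hwt e.symm
      rw [List.count_cons, ih hnd, hne]
      simp only [List.contains_cons, hne, Bool.false_or, if_neg, Bool.false_eq_true, not_false_iff]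
      split_ifs <;> push_cast <;> omega

theorem pvFoldA (toks : List String) (c : Int) :
    toks.foldl (fun score t =>
      let score := if POSITIVE_WORDS.contains t then score + 1 else score
      if NEGATIVE_WORDS.contains t then score - 1 else score) c
    = c + (pvSumCount POSITIVE_WORDS toks - pvSumCount NEGATIVE_WORDS toks) := by
  induction toks generalizing c with
  | nil => simp [pvSumCount_nil]
  | cons t ts ih =>
    have hP : POSITIVE_WORDS.Nodup := by decide
    have hN : NEGATIVE_WORDS.Nodup := by decide
    simp only [List.foldl_cons, ih,
      pvSumCount_cons POSITIVE_WORDS hP t ts, pvSumCount_cons NEGATIVE_WORDS hN t ts]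
    split_ifs <;> omega

theorem pvFoldB (ws ts : List String) (c : Int) :
    ws.foldl (fun s w => s + (PySem.Dict.counter ts).getD w 0) c = c + pvSumCount ws ts := by
  induction ws generalizing c with
  | nil => simp [pvSumCount]
  | cons w ws ih =>
    rw [List.foldl_cons, ih]
    simp only [pvSumCount, List.map_cons, List.sum_cons, PySem.Dict.getD_counter]
    omega

theorem pvScore_eq (text : String) :
    (quick_sentiment text).2 = (quick_sentiment_alt text).2 := by
  simp only [quick_sentiment, quick_sentiment_alt, pvFoldA, pvFoldB]
  omega

-- ===== VERDICT =====
theorem quick_sentiment_spec : Claim_equal_quick_sentiment := by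
  intro text _
  unfold Spec_quick_sentiment
  have h := pvScore_eq text
  simp only [quick_sentiment, quick_sentiment_alt, pvFoldA, pvFoldB] at h ⊢
  rw [h]
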